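-- pv_equiv track=rewrite | github.com/gaplin/Advent_of_Code_2018 | 5/day5p2.py | get_react_length
-- ===== SOURCE A (Python) =====
-- def get_react_length(polymer: str) -> int:
--     n = len(polymer)
--     i = 0
--     ranges = []
--     while i < n - 1:
--         l, r = i, i + 1
--         while l >= 0 and r < n:
--             if polymer[l].lower() == polymer[r].lower() and polymer[l].islower() != polymer[r].islower():
--                 l -= 1
--                 r += 1
--                 while l >= 0 and len(ranges) > 0:
--                     if l == ranges[-1][1]:
--                         l = ranges[-1][0] - 1
--                         ranges.pop()
--                     else:
--                         break
--             else:
--                 break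
--         if r > i + 1:
--             ranges.append((l + 1, r - 1))
--         i = r
--
--     result = n
--     for low, high in ranges:
--         result -= high - low + 1
--     return result
-- ===== SOURCE B (Python) =====
-- def get_react_length(polymer: str) -> int:
--     stack = []
--     for c in polymer:
--         if stack and stack[-1].lower() == c.lower() and stack[-1].islower() != c.islower():
--             stack.pop()
--         else:
--             stack.append(c)
--     return len(stack)
-- ===== Notes on version B (the rewrite author's own statement) =====
-- stated objective: simpler
-- what changed: Replaces A's nested expand-around-center loops with a bookkeeping list of annihilated ranges (and a final subtraction pass) by a single left-to-right scan that keeps unreacted characters on a stack, popping when the new character reacts with the top.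
import Mathlib
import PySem

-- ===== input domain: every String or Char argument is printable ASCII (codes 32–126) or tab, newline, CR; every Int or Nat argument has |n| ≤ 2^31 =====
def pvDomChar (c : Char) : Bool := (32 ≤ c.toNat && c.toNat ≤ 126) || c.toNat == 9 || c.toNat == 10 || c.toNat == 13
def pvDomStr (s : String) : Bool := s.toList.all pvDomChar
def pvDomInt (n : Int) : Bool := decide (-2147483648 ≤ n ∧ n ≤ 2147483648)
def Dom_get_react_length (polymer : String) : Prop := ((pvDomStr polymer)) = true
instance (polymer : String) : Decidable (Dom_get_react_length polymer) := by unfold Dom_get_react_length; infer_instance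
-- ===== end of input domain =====

-- B replaces A's expand-around-center scan with a ranges list by one left-to-right stack pass (simpler).

-- ===== PORT A =====
-- polymer[l].lower() == polymer[r].lower() and polymer[l].islower() != polymer[r].islower()
def reactsA (a b : Char) : Bool :=
  (PySem.Chars.lowerChar a == PySem.Chars.lowerChar b) && (PySem.Chars.islower a != PySem.Chars.islower b)

-- polymer[j]; every access in A is guarded by 0 ≤ j < n, so the default is never used
def pgetA (L : List Char) (j : Int) : Char := (PySem.List.pyGet? L j).getD ' '

-- the inner `while l >= 0 and len(ranges) > 0: …` pop loop; ranges is kept most-recent-first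
-- (Python appends/pops at the END of the list; cons/head is the same stack)
def skipA : Int → List (Int × Int) → Int × List (Int × Int)
  | l, [] => (l, [])
  | l, (lo, hi) :: rest =>
    if 0 ≤ l ∧ l = hi then skipA (lo - 1) rest else (l, (lo, hi) :: rest)

-- the inner `while l >= 0 and r < n:` expansion loop; the fuel argument only bounds the
-- iteration count (each step increases r by 1, so (n - r).toNat iterations always suffice)
def innerA (L : List Char) (n : Int) : Nat → Int → Int → List (Int × Int) → Int × Int × List (Int × Int)
  | 0, l, r, R => (l, r, R)
  | fuel + 1, l, r, R =>
    if 0 ≤ l ∧ r < n then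
      if reactsA (pgetA L l) (pgetA L r) then
        let s := skipA (l - 1) R
        innerA L n fuel s.1 (r + 1) s.2
      else (l, r, R)
    else (l, r, R)

-- the outer `while i < n - 1:` loop; fuel bounds the iteration count (i strictly increases)
def outerA (L : List Char) (n : Int) : Nat → Int → List (Int × Int) → List (Int × Int)
  | 0, _, R => R
  | fuel + 1, i, R =>
    if i < n - 1 then
      let t := innerA L n (n - (i + 1)).toNat i (i + 1) R
      outerA L n fuel t.2.1 (if i + 1 < t.2.1 then (t.1 + 1, t.2.1 - 1) :: t.2.2 else t.2.2)
    else R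

def get_react_length (polymer : String) : Int :=
  let L := polymer.toList
  let n : Int := L.length
  let ranges := outerA L n n.toNat 0 []
  -- `for low, high in ranges: result -= high - low + 1` (Python iterates oldest-first, hence reverse)
  ranges.reverse.foldl (fun result p => result - (p.2 - p.1 + 1)) n

-- ===== PORT B =====
def reactsB (a b : Char) : Bool :=
  (PySem.Chars.lowerChar a == PySem.Chars.lowerChar b) && (PySem.Chars.islower a != PySem.Chars.islower b)

-- one step of the stack pass: pop a reacting top, else push
def stepB (stack : List Char) (c : Char) : List Char :=
  match stack with
  | t :: rest => if reactsB t c then rest else c :: t :: rest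
  | [] => [c]

def get_react_length_alt (polymer : String) : Int :=
  ((polymer.toList.foldl stepB []).length : Int)

-- ===== PRECONDITION & SPEC =====
def Spec_get_react_length (polymer : String) (out : Int) : Prop := out = get_react_length_alt polymer
instance (polymer : String) (out : Int) : Decidable (Spec_get_react_length polymer out) := by unfold Spec_get_react_length; infer_instance

-- ===== CLAIM (what is proved, stated in full; the proofs are below) =====
def Claim_equal_get_react_length : Prop := ∀ (polymer : String), Dom_get_react_length polymer → Spec_get_react_length polymer (get_react_length polymer)

-- ===== LEMMAS AND PROOFS =====

theorem reactsB_eq (a b : Char) : reactsB a b = reactsA a b := rfl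

-- the stack of surviving characters of the prefix L[0:l+1], ranges annihilated, most recent survivor first
def stackOf (L : List Char) (l : Int) (R : List (Int × Int)) : List Char :=
  if l < 0 then []
  else
    match R with
    | (lo, hi) :: rest =>
      if hi = l then (if lo ≤ l then stackOf L (lo - 1) rest else []) else pgetA L l :: stackOf L (l - 1) R
    | [] => pgetA L l :: stackOf L (l - 1) ([] : List (Int × Int))
  termination_by (l + 1).toNat
  decreasing_by all_goals omega

-- well-formed ranges below position l: within [0, l], ordered, disjoint (most recent first)
def WFr : Int → List (Int × Int) → Prop
  | _, [] => True
  | l, (lo, hi) :: rest => 0 ≤ lo ∧ lo ≤ hi ∧ hi ≤ l ∧ WFr (lo - 1) rest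

-- the most recent range does not end exactly at l
def noEnd (l : Int) : List (Int × Int) → Prop
  | [] => True
  | (_, hi) :: _ => hi ≠ l

def sizes (R : List (Int × Int)) : Int := (R.map (fun p => p.2 - p.1 + 1)).sum

theorem sizes_reverse (R : List (Int × Int)) : sizes R.reverse = sizes R := by
  simp [sizes]

theorem foldl_sub_sizes (R : List (Int × Int)) (acc : Int) :
    R.foldl (fun result p => result - (p.2 - p.1 + 1)) acc = acc - sizes R := by
  induction R generalizing acc with
  | nil => simp [sizes]
  | cons p R ih => simp [List.foldl_cons, ih, sizes]; ring

theorem stackOf_neg (L : List Char) (l : Int) (R : List (Int × Int)) (h : l < 0) :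
    stackOf L l R = [] := by
  rw [stackOf.eq_def]; simp [h]

theorem stackOf_cons (L : List Char) (l : Int) (R : List (Int × Int))
    (h0 : 0 ≤ l) (hne : noEnd l R) :
    stackOf L l R = pgetA L l :: stackOf L (l - 1) R := by
  rw [stackOf.eq_def]
  cases R with
  | nil => simp [show ¬ l < 0 by omega]
  | cons p rest =>
    obtain ⟨lo, hi⟩ := p
    simp only [noEnd] at hne
    simp [show ¬ l < 0 by omega, hne]

theorem stackOf_pop (L : List Char) (l lo : Int) (rest : List (Int × Int))
    (h0 : 0 ≤ l) (hlo : lo ≤ l) :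
    stackOf L l ((lo, l) :: rest) = stackOf L (lo - 1) rest := by
  rw [stackOf.eq_def]
  simp [show ¬ l < 0 by omega, hlo]

theorem WFr_mono (l l' : Int) (R : List (Int × Int)) (h : WFr l R) (hle : l ≤ l') :
    WFr l' R := by
  cases R with
  | nil => trivial
  | cons p rest => obtain ⟨lo, hi⟩ := p; simp only [WFr] at *; exact ⟨h.1, h.2.1, by omega, h.2.2.2⟩

theorem WFr_strengthen (l : Int) (R : List (Int × Int)) (h : WFr l R) (hne : noEnd l R) :
    WFr (l - 1) R := by
  cases R with
  | nil => trivial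
  | cons p rest =>
    obtain ⟨lo, hi⟩ := p
    simp only [WFr, noEnd] at *
    exact ⟨h.1, h.2.1, by omega, h.2.2.2⟩

theorem stackOf_length (L : List Char) (l : Int) (R : List (Int × Int))
    (hw : WFr l R) (hl : -1 ≤ l) :
    ((stackOf L l R).length : Int) = l + 1 - sizes R := by
  induction l, R using stackOf.induct with
  | case1 l R hneg =>
    cases R with
    | nil => rw [stackOf_neg L l [] hneg]; simp [sizes]; omega
    | cons p rest =>
      obtain ⟨lo, hi⟩ := p
      simp only [WFr] at hw
      omega
  | case2 lo hi rest hneg hlo ih =>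
    simp only [WFr] at hw
    rw [stackOf_pop L hi lo rest (by omega) hlo]
    have := ih hw.2.2.2 (by omega)
    simp only [sizes, List.map_cons, List.sum_cons] at *
    omega
  | case3 lo hi rest hneg hlo =>
    simp only [WFr] at hw
    omega
  | case4 l hneg lo hi rest hhi ih =>
    simp only [WFr] at hw
    rw [stackOf_cons L l ((lo, hi) :: rest) (by omega) (by simpa [noEnd] using hhi)]
    have := ih (WFr_strengthen l _ (by simp only [WFr]; exact hw) (by simpa [noEnd] using hhi)) (by omega)
    simp only [List.length_cons] at *
    push_cast at *
    omega
  | case5 l hneg ih =>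
    rw [stackOf_cons L l [] (by omega) trivial]
    have := ih trivial (by omega)
    simp only [List.length_cons] at *
    push_cast at *
    omega

theorem skipA_spec (L : List Char) (l : Int) (R : List (Int × Int))
    (hw : WFr l R) (hl : -1 ≤ l) :
    WFr (skipA l R).1 (skipA l R).2 ∧
    stackOf L (skipA l R).1 (skipA l R).2 = stackOf L l R ∧
    ((skipA l R).1 < 0 ∨ noEnd (skipA l R).1 (skipA l R).2) ∧
    (skipA l R).1 ≤ l ∧ -1 ≤ (skipA l R).1 := by
  induction R generalizing l with
  | nil =>
    rw [skipA]
    exact ⟨trivial, rfl, Or.inr trivial, le_refl l, hl⟩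
  | cons p rest ih =>
    obtain ⟨lo, hi⟩ := p
    simp only [WFr] at hw
    rw [skipA]
    by_cases hg : 0 ≤ l ∧ l = hi
    · rw [if_pos hg]
      have hrec := ih (lo - 1) hw.2.2.2 (by omega)
      refine ⟨hrec.1, ?_, hrec.2.2.1, by omega, hrec.2.2.2.2⟩
      rw [hrec.2.1, ← stackOf_pop L l lo rest hg.1 (by omega)]
      rw [hg.2]
    · rw [if_neg hg]
      refine ⟨by simp only [WFr]; exact hw, rfl, Or.inr ?_, le_refl l, hl⟩
      simp only [noEnd]
      omega

-- the characters actually examined: one step of the prefix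
theorem take_succ_int (L : List Char) (r : Int) (h0 : 0 ≤ r) (h1 : r < (L.length : Int)) :
    L.take (r + 1).toNat = L.take r.toNat ++ [pgetA L r] := by
  have hr : r.toNat < L.length := by omega
  have : pgetA L r = L[r.toNat] := by
    unfold pgetA
    rw [PySem.List.pyGet?_of_nonneg L h0]
    simp [List.getElem?_eq_getElem hr]
  rw [this, show (r + 1).toNat = r.toNat + 1 by omega, List.take_add_one,
    List.getElem?_eq_getElem hr]
  rfl

theorem noEnd_of_WFr_lt (l l' : Int) (R : List (Int × Int)) (h : WFr l R) (hlt : l < l') :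
    noEnd l' R := by
  cases R with
  | nil => trivial
  | cons p rest => obtain ⟨lo, hi⟩ := p; simp only [WFr] at h; simp only [noEnd]; omega

theorem innerA_spec (L : List Char) (n : Int) (hn : n = (L.length : Int)) :
    ∀ (fuel : Nat) (l r : Int) (R : List (Int × Int)),
    n - r ≤ (fuel : Int) →
    -1 ≤ l → l < r → r ≤ n → WFr l R → (l < 0 ∨ noEnd l R) →
    List.foldl stepB [] (L.take r.toNat) = stackOf L l R →
    WFr (innerA L n fuel l r R).1 (innerA L n fuel l r R).2.2 ∧
    ((innerA L n fuel l r R).1 < 0 ∨ noEnd (innerA L n fuel l r R).1 (innerA L n fuel l r R).2.2) ∧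
    -1 ≤ (innerA L n fuel l r R).1 ∧
    r ≤ (innerA L n fuel l r R).2.1 ∧ (innerA L n fuel l r R).2.1 ≤ n ∧
    (innerA L n fuel l r R).1 + (innerA L n fuel l r R).2.1 ≤ l + r ∧
    List.foldl stepB [] (L.take (innerA L n fuel l r R).2.1.toNat) =
      stackOf L (innerA L n fuel l r R).1 (innerA L n fuel l r R).2.2 ∧
    ((innerA L n fuel l r R).1 < 0 ∨ (innerA L n fuel l r R).2.1 = n ∨
       reactsA (pgetA L (innerA L n fuel l r R).1) (pgetA L (innerA L n fuel l r R).2.1) = false) ∧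
    ((innerA L n fuel l r R).2.1 = r → (innerA L n fuel l r R).1 = l ∧ (innerA L n fuel l r R).2.2 = R) := by
  intro fuel
  induction fuel with
  | zero =>
    intro l r R hfuel hl1 hlr hrn hw hsafe hrun
    have hun : innerA L n 0 l r R = (l, r, R) := rfl
    rw [hun]
    refine ⟨hw, hsafe, hl1, le_refl r, hrn, le_refl _, hrun,
      Or.inr (Or.inl ?_), fun _ => ⟨rfl, rfl⟩⟩
    show r = n
    omega
  | succ fuel ih =>
    intro l r R hfuel hl1 hlr hrn hw hsafe hrun
    by_cases hg : 0 ≤ l ∧ r < n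
    · by_cases hre : reactsA (pgetA L l) (pgetA L r) = true
      · have hne : noEnd l R := hsafe.resolve_left (by omega)
        have hwm : WFr (l - 1) R := WFr_strengthen l R hw hne
        have hsk := skipA_spec L (l - 1) R hwm (by omega)
        have hun : innerA L n (fuel + 1) l r R =
            innerA L n fuel (skipA (l - 1) R).1 (r + 1) (skipA (l - 1) R).2 := by
          simp only [innerA, if_pos hg, if_pos hre]
        have hrun' : List.foldl stepB [] (L.take (r + 1).toNat) =
            stackOf L (skipA (l - 1) R).1 (skipA (l - 1) R).2 := by
          rw [take_succ_int L r (by omega) (by omega), List.foldl_append, hrun,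
            stackOf_cons L l R (by omega) hne]
          simp only [List.foldl_cons, List.foldl_nil, stepB, reactsB_eq, hre, if_pos]
          exact hsk.2.1.symm
        have ihc := ih (skipA (l - 1) R).1 (r + 1) (skipA (l - 1) R).2 (by omega)
          hsk.2.2.2.2 (by omega) (by omega) hsk.1 hsk.2.2.1 hrun'
        rw [hun]
        obtain ⟨c1, c2, c3, c4, c5, c6, c7, c8, _⟩ := ihc
        refine ⟨c1, c2, c3, by omega, c5, ?_, c7, c8, by omega⟩
        have := hsk.2.2.2.1
        omega
      · have hun : innerA L n (fuel + 1) l r R = (l, r, R) := by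
          simp only [innerA, if_pos hg, if_neg hre]
        rw [hun]
        exact ⟨hw, hsafe, hl1, le_refl r, hrn, le_refl _, hrun,
          Or.inr (Or.inr (by simpa using hre)), fun _ => ⟨rfl, rfl⟩⟩
    · have hun : innerA L n (fuel + 1) l r R = (l, r, R) := by
        simp only [innerA, if_neg hg]
      rw [hun]
      refine ⟨hw, hsafe, hl1, le_refl r, hrn, le_refl _, hrun, ?_, fun _ => ⟨rfl, rfl⟩⟩
      by_cases hl0 : l < 0
      · exact Or.inl hl0
      · refine Or.inr (Or.inl ?_)
        show r = n
        rcases not_and_or.mp hg with h | h <;> omega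

theorem outerA_spec (L : List Char) (n : Int) (hn : n = (L.length : Int)) :
    ∀ (fuel : Nat) (i : Int) (R : List (Int × Int)),
    n - i ≤ (fuel : Int) →
    0 ≤ i → i ≤ n → WFr (i - 1) R →
    List.foldl stepB [] (L.take i.toNat) = stackOf L (i - 1) R →
    (i < n → List.foldl stepB [] (L.take (i + 1).toNat) = pgetA L i :: stackOf L (i - 1) R) →
    n - sizes (outerA L n fuel i R) = ((List.foldl stepB [] L).length : Int) := by
  intro fuel
  induction fuel with
  | zero =>
    intro i R hfuel h0i hin hw hrun hpush
    have hieq : i = n := by omega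
    have hun : outerA L n 0 i R = R := rfl
    rw [hun]
    rw [show i.toNat = L.length by omega, List.take_length] at hrun
    rw [hrun, stackOf_length L (i - 1) R hw (by omega)]
    omega
  | succ fuel ih =>
    intro i R hfuel h0i hin hw hrun hpush
    by_cases hg : i < n - 1
    · have hne : noEnd i R := noEnd_of_WFr_lt (i - 1) i R hw (by omega)
      have hconsi : stackOf L i R = pgetA L i :: stackOf L (i - 1) R :=
        stackOf_cons L i R h0i hne
      have hrun1 : List.foldl stepB [] (L.take (i + 1).toNat) = stackOf L i R := by
        rw [hconsi]; exact hpush (by omega)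
      have hsp := innerA_spec L n hn (n - (i + 1)).toNat i (i + 1) R (by omega) (by omega)
        (by omega) (by omega) (WFr_mono (i - 1) i R hw (by omega)) (Or.inr hne) hrun1
      set t := innerA L n (n - (i + 1)).toNat i (i + 1) R with ht
      obtain ⟨hw', hsafe', hl1', hrge', hrle', hsum', hrun', hstop', hid'⟩ := hsp
      have hun : outerA L n (fuel + 1) i R =
          outerA L n fuel t.2.1 (if i + 1 < t.2.1 then (t.1 + 1, t.2.1 - 1) :: t.2.2 else t.2.2) := by
        simp only [outerA, if_pos hg, ht]
      rw [hun]
      by_cases hlt : i + 1 < t.2.1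
      · rw [if_pos hlt]
        have hb1 : t.1 + 1 ≤ t.2.1 - 1 := by omega
        have hwf'' : WFr (t.2.1 - 1) ((t.1 + 1, t.2.1 - 1) :: t.2.2) := by
          refine ⟨by omega, hb1, le_refl _, ?_⟩
          rwa [show t.1 + 1 - 1 = t.1 by ring]
        have hpop : stackOf L (t.2.1 - 1) ((t.1 + 1, t.2.1 - 1) :: t.2.2) = stackOf L t.1 t.2.2 := by
          rw [stackOf_pop L (t.2.1 - 1) (t.1 + 1) t.2.2 (by omega) hb1,
            show t.1 + 1 - 1 = t.1 by ring]
        apply ih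
        · omega
        · omega
        · omega
        · exact hwf''
        · rw [hpop]; exact hrun'
        · intro hr'n
          rw [take_succ_int L t.2.1 (by omega) (by omega), List.foldl_append, hrun', hpop]
          by_cases hneg : t.1 < 0
          · rw [stackOf_neg L t.1 t.2.2 hneg]
            simp [stepB]
          · have hfalse : reactsA (pgetA L t.1) (pgetA L t.2.1) = false := by
              rcases hstop' with h | h | h
              · omega
              · omega
              · exact h
            rw [stackOf_cons L t.1 t.2.2 (by omega) (hsafe'.resolve_left hneg)]
            simp [stepB, reactsB_eq, hfalse]
      · rw [if_neg hlt]
        have hr : t.2.1 = i + 1 := by omega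
        obtain ⟨hl', hR'⟩ := hid' hr
        rw [hr, hl', hR'] at hrun'
        apply ih
        · omega
        · omega
        · omega
        · rw [hr, hR', show i + 1 - 1 = i by ring]
          exact WFr_mono (i - 1) i R hw (by omega)
        · rw [hr, hR', show i + 1 - 1 = i by ring]
          exact hrun'
        · intro hi1n
          rw [hr] at hi1n
          rw [hr, hR', show i + 1 - 1 = i by ring, take_succ_int L (i + 1) (by omega) (by omega),
            List.foldl_append, hrun', hconsi]
          have hfalse : reactsA (pgetA L i) (pgetA L (i + 1)) = false := by
            rcases hstop' with h | h | h
            · omega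
            · omega
            · rwa [hl', hr] at h
          simp [stepB, reactsB_eq, hfalse]
    · have hun : outerA L n (fuel + 1) i R = R := by
        simp only [outerA, if_neg hg]
      rw [hun]
      by_cases hieq : i = n
      · subst hieq
        rw [show i.toNat = L.length by omega, List.take_length] at hrun
        rw [hrun, stackOf_length L (i - 1) R hw (by omega)]
        omega
      · have hi : i = n - 1 := by omega
        have := hpush (by omega)
        rw [show (i + 1).toNat = L.length by omega, List.take_length] at this
        rw [this]
        simp only [List.length_cons]
        push_cast
        rw [stackOf_length L (i - 1) R hw (by omega)]
        omega

-- ===== VERDICT (by name: the statement is the Claim_ definition above) =====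
theorem get_react_length_spec : Claim_equal_get_react_length := by
  intro polymer _
  unfold Spec_get_react_length get_react_length get_react_length_alt
  simp only []
  rw [foldl_sub_sizes, sizes_reverse]
  set L := polymer.toList with hL
  have h := outerA_spec L (L.length : Int) rfl (L.length : Int).toNat 0 [] (by omega) (by omega) (by positivity) trivial
    (by simp [stackOf_neg]) ?_
  · simpa using h
  · intro hn
    rw [take_succ_int L 0 (by omega) hn]
    simp [stackOf_neg, stepB]
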